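-- pv_equiv track=rewrite | github.com/Alexidis/python_basics | lessons/lesson4/lesson4_6.py | cycle_iter_creator
-- ===== SOURCE A (Python) =====
-- from itertools import count, cycle
--
-- def cycle_iter_creator(some_list, repeats=5):
--     """Не бесконечный итератор повторений списка"""
--     # инициализируем счетчик
--     repeat = 0
--     # вычисляем сколько потребуется повторений для прокрутки всего спика repeats раз
--     max_repeats = len(some_list) * repeats
--     for i in cycle(some_list):
--         if repeat < max_repeats:
--             # перед выдачей значения увеличиваем счетчик, чтобы не уйти в бесконечность
--             repeat += 1
--             yield i
--         else:
--             break
-- ===== SOURCE B (Python) =====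
-- def cycle_iter_creator(some_list, repeats=5):
--     """Не бесконечный итератор повторений списка"""
--     if not some_list:
--         return
--     for _ in range(repeats):
--         for i in some_list:
--             yield i
-- ===== Notes on version B (the rewrite author's own statement) =====
-- stated objective: idiomatic
-- what changed: Replaces the infinite itertools.cycle stream plus a counter-and-break against len(some_list)*repeats with two plain nested loops where the outer range(repeats) controls termination.
import Mathlib
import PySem

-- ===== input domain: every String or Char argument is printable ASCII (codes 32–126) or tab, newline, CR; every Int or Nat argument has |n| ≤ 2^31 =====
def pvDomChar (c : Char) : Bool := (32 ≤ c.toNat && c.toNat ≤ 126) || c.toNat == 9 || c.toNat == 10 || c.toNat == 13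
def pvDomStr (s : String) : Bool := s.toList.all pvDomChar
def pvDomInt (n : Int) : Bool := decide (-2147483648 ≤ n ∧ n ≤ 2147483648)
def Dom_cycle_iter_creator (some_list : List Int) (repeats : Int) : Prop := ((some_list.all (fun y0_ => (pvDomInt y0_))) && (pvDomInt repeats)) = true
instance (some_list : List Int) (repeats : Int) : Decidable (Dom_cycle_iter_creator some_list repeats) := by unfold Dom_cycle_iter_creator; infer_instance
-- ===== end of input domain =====

-- B replaces A's infinite cycle() + counter-and-break with two nested loops driven by
-- range(repeats) (idiomatic, same cost). Both are generators; equivalence is about the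
-- yielded sequence (as a list). Neither mutates its arguments.

-- ===== PORT A =====
-- A iterates cycle(some_list), yielding while repeat < max_repeats and breaking after.
-- The loop thus yields exactly max(0, len(some_list)*repeats) elements of the cycle;
-- cycle([]) yields nothing (the for-loop exits immediately), handled by the [] cases.
-- `cur` is the remaining tail of the current pass of cycle; fuel = remaining yields.
def cycleTakeA (orig : List Int) : List Int → Nat → List Int
  | _, 0 => []
  | [], Nat.succ n =>
      match orig with
      | [] => []                                   -- cycle([]) is empty: loop body never runs
      | a :: rest => a :: cycleTakeA orig rest n
  | a :: rest, Nat.succ n => a :: cycleTakeA orig rest n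

def cycle_iter_creator (some_list : List Int) (repeats : Int) : List Int :=
  -- max_repeats = len(some_list) * repeats; when it is ≤ 0 the guard repeat < max_repeats
  -- is false at once and A yields nothing — exactly (…).toNat = 0 yields.
  cycleTakeA some_list some_list ((some_list.length * repeats).toNat)

-- ===== PORT B =====
-- if not some_list: return; for _ in range(repeats): for i in some_list: yield i
def cycle_iter_creator_alt (some_list : List Int) (repeats : Int) : List Int :=
  if some_list = [] then []
  else (PySem.List.pyRange 0 repeats 1).foldl (fun acc _ => acc ++ some_list) []

-- ===== PRECONDITION & SPEC =====
def Spec_cycle_iter_creator (some_list : List Int) (repeats : Int) (out : List Int) : Prop := out = cycle_iter_creator_alt some_list repeats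
instance (some_list : List Int) (repeats : Int) (out : List Int) : Decidable (Spec_cycle_iter_creator some_list repeats out) := by unfold Spec_cycle_iter_creator; infer_instance

-- ===== CLAIM (what is proved, stated in full; the proofs are below) =====
def Claim_equal_cycle_iter_creator : Prop := ∀ (some_list : List Int) (repeats : Int), Dom_cycle_iter_creator some_list repeats → Spec_cycle_iter_creator some_list repeats (cycle_iter_creator some_list repeats)

-- ===== LEMMAS AND PROOFS =====

-- k copies of l, concatenated (proof-side normal form for both sides)
def repN (k : Nat) (l : List Int) : List Int :=
  match k with
  | 0 => []
  | Nat.succ k => l ++ repN k l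

theorem cycleTakeA_nil_refill (orig : List Int) (m : Nat) :
    cycleTakeA orig [] m = cycleTakeA orig orig m := by
  cases m with
  | zero => cases orig <;> rfl
  | succ n => cases orig <;> rfl

theorem cycleTakeA_pass (orig : List Int) :
    ∀ (cur : List Int) (m : Nat),
      cycleTakeA orig cur (cur.length + m) = cur ++ cycleTakeA orig orig m := by
  intro cur
  induction cur with
  | nil => intro m; simpa using cycleTakeA_nil_refill orig m
  | cons a rest ih =>
      intro m
      have h : rest.length + 1 + m = Nat.succ (rest.length + m) := by omega
      simp only [List.length_cons, List.cons_append, h]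
      simp [cycleTakeA, ih m]

theorem cycleTakeA_repN (orig : List Int) (k : Nat) :
    cycleTakeA orig orig (orig.length * k) = repN k orig := by
  induction k with
  | zero => simp [repN, cycleTakeA]
  | succ k ih =>
      have : orig.length * (k + 1) = orig.length + orig.length * k := by ring
      rw [this, cycleTakeA_pass orig orig (orig.length * k), ih]
      rfl

theorem foldl_append_repN (l : List Int) :
    ∀ (xs : List Int) (acc : List Int),
      xs.foldl (fun acc _ => acc ++ l) acc = acc ++ repN xs.length l := by
  intro xs
  induction xs with
  | nil => intro acc; simp [repN]
  | cons x xs ih =>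
      intro acc
      simp only [List.foldl_cons, List.length_cons, ih]
      show (acc ++ l) ++ repN xs.length l = acc ++ repN (xs.length + 1) l
      rw [List.append_assoc]; rfl

theorem toNat_mul_len (n : Nat) (r : Int) : ((n : Int) * r).toNat = n * r.toNat := by
  rcases le_or_gt r 0 with h | h
  · have h1 : (n : Int) * r ≤ 0 := mul_nonpos_of_nonneg_of_nonpos (by positivity) h
    rw [Int.toNat_of_nonpos h1, Int.toNat_of_nonpos h, Nat.mul_zero]
  · rw [Int.toNat_mul (by positivity) (le_of_lt h)]
    simp

-- ===== VERDICT (by name: the statement is the Claim_ definition above) =====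
theorem cycle_iter_creator_spec : Claim_equal_cycle_iter_creator := by
  intro some_list repeats _
  show cycle_iter_creator some_list repeats = cycle_iter_creator_alt some_list repeats
  unfold cycle_iter_creator cycle_iter_creator_alt
  rw [toNat_mul_len, cycleTakeA_repN, foldl_append_repN]
  rcases eq_or_ne some_list [] with h | h
  · subst h
    have : ∀ k, repN k ([] : List Int) = [] := by
      intro k; induction k with
      | zero => rfl
      | succ k ih => simpa [repN] using ih
    simp [this]
  · simp [h, PySem.List.length_pyRange_one]
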